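-- pv_equiv track=rewrite | github.com/Easyblue11/EB-Project | EBSQL.py | __PriorityForId
-- ===== SOURCE A (Python) =====
-- def __PriorityForId(PDict) -> list:
--     ValueList = list(PDict.values())
--     MaxValue = max(ValueList)
--     if MaxValue != 0:
--         RetIdList = list()
--         for id in PDict:
--             if PDict[id] == MaxValue:
--                 RetIdList.append(id)
--         return RetIdList
--     else:
--         return list()
-- ===== SOURCE B (Python) =====
-- def __PriorityForId(PDict) -> list:
--     items = iter(PDict.items())
--     try:
--         best_key, best = next(items)
--     except StopIteration:
--         raise ValueError("empty dict")
--     keys = [best_key]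
--     for k, v in items:
--         if v > best:
--             best = v
--             keys = [k]
--         elif v == best:
--             keys.append(k)
--     return keys if best != 0 else []
-- ===== Notes on version B (the rewrite author's own statement) =====
-- stated objective: alternative
-- what changed: Replaces A's two passes (max over values, then a second loop doing a dict lookup per key) by a single pass over items() that maintains the running maximum and the list of keys achieving it.
import Mathlib
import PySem

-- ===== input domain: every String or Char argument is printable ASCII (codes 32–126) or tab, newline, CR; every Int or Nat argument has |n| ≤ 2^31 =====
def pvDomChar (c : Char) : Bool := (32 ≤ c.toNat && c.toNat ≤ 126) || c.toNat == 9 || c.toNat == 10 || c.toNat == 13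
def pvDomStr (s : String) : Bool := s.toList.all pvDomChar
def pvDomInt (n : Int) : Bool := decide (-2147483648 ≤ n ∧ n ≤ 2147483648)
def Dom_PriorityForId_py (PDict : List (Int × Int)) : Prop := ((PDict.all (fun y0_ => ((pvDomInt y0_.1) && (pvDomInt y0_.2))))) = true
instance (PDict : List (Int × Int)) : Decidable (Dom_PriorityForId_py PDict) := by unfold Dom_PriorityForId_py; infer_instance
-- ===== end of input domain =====

-- B replaces A's two passes (max over values, then a keyed-lookup filter loop) by one
-- pass over the items maintaining the running maximum and the keys achieving it.


-- ===== PORT A =====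
def PriorityForId_py (PDict : List (Int × Int)) : List Int :=
  let d := PySem.Dict.ofList PDict
  let ValueList := d.values
  match PySem.List.max? ValueList (fun y => y) with
  | none => []  -- max([]) raises ValueError: excluded by Pre_
  | some MaxValue =>
    if MaxValue ≠ 0 then
      d.keys.foldl (fun RetIdList id =>
        if d.getD id 0 = MaxValue then RetIdList ++ [id] else RetIdList) []
    else []

-- ===== PORT B =====
def PriorityForId_py_alt (PDict : List (Int × Int)) : List Int :=
  match (PySem.Dict.ofList PDict).items with
  | [] => []  -- empty dict: Python B raises ValueError, excluded by Pre_
  | (k0, v0) :: rest =>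
    let s := rest.foldl (fun (s : Int × List Int) kv =>
      if s.1 < kv.2 then (kv.2, [kv.1])
      else if kv.2 = s.1 then (s.1, s.2 ++ [kv.1])
      else s) (v0, [k0])
    if s.1 ≠ 0 then s.2 else []

-- ===== PRECONDITION & SPEC =====
-- Pre_ excludes only the empty dict, on which both A (max([])) and B raise ValueError.
def Pre_PriorityForId_py (PDict : List (Int × Int)) : Prop := PDict ≠ []
instance (PDict : List (Int × Int)) : Decidable (Pre_PriorityForId_py PDict) := by unfold Pre_PriorityForId_py; infer_instance
def pvWitness_PriorityForId_py : (List (Int × Int)) := [(1, 2), (3, 2)]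
def Spec_PriorityForId_py (PDict : List (Int × Int)) (out : List Int) : Prop := out = PriorityForId_py_alt PDict
instance (PDict : List (Int × Int)) (out : List Int) : Decidable (Spec_PriorityForId_py PDict out) := by unfold Spec_PriorityForId_py; infer_instance

-- ===== CLAIM (what is proved, stated in full; the proofs are below) =====
def Claim_equal_PriorityForId_py : Prop := ∀ (PDict : List (Int × Int)), Dom_PriorityForId_py PDict → Pre_PriorityForId_py PDict → Spec_PriorityForId_py PDict (PriorityForId_py PDict)

-- ===== LEMMAS AND PROOFS =====

-- A's collecting loop is a filter on the value component.
theorem collect_eq_filter (l : List (Int × Int)) (M : Int) (acc : List Int) :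
    l.foldl (fun acc kv => if kv.2 = M then acc ++ [kv.1] else acc) acc
      = acc ++ (l.filter (fun kv => kv.2 = M)).map Prod.fst := by
  induction l generalizing acc with
  | nil => simp
  | cons p t ih =>
    by_cases h : p.2 = M <;> simp [List.foldl_cons, h, ih,]

-- B's single-pass fold computes the running maximum and the keys achieving it.
theorem foldB_spec (t : List (Int × Int)) (b : Int) (ks : List Int) :
    t.foldl (fun (s : Int × List Int) kv =>
        if s.1 < kv.2 then (kv.2, [kv.1])
        else if kv.2 = s.1 then (s.1, s.2 ++ [kv.1])
        else s) (b, ks)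
      = ((t.map Prod.snd).foldl max b,
         (if b = (t.map Prod.snd).foldl max b then ks else [])
           ++ (t.filter (fun kv => kv.2 = (t.map Prod.snd).foldl max b)).map Prod.fst) := by
  induction t generalizing b ks with
  | nil => simp
  | cons p t ih =>
    have hle : ∀ (c : Int), c ≤ (t.map Prod.snd).foldl max c :=
      fun c => (PySem.List.le_foldl_max (t.map Prod.snd) c).1
    simp only [List.foldl_cons, List.map_cons, List.filter_cons]
    rcases lt_trichotomy b p.2 with hlt | heq | hgt
    · have hbne : b ≠ (t.map Prod.snd).foldl max p.2 := ne_of_lt (lt_of_lt_of_le hlt (hle p.2))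
      simp only [if_pos hlt, ih, max_eq_right hlt.le, if_neg hbne]
      by_cases h2 : p.2 = (t.map Prod.snd).foldl max p.2
      · simp [← h2]
      · simp [h2]
    · have hmaxb : max b p.2 = b := by omega
      rw [if_neg (by omega : ¬ (b < p.2)), if_pos heq.symm, ih]
      simp only [hmaxb]
      by_cases h2 : b = (t.map Prod.snd).foldl max b
      · have h2' : p.2 = (t.map Prod.snd).foldl max b := heq.symm.trans h2
        rw [if_pos h2, if_pos h2, if_pos (decide_eq_true h2')]
        simp
      · have h2' : ¬ p.2 = (t.map Prod.snd).foldl max b := fun h => h2 (heq.trans h)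
        rw [if_neg h2, if_neg h2, if_neg (by simp [h2'])]
    · have h2 : p.2 ≠ (t.map Prod.snd).foldl max b := ne_of_lt (lt_of_lt_of_le hgt (hle b))
      simp only [if_neg (by omega : ¬ b < p.2), if_neg (by omega : ¬ p.2 = b), ih, max_eq_left hgt.le]
      simp [h2]

theorem PriorityForId_eq_alt (PDict : List (Int × Int)) :
    PriorityForId_py PDict = PriorityForId_py_alt PDict := by
  unfold PriorityForId_py PriorityForId_py_alt
  dsimp only
  have hnd : (PySem.Dict.ofList PDict).keys.Nodup := PySem.Dict.nodup_keys_ofList PDict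
  cases hit : (PySem.Dict.ofList PDict).items with
  | nil =>
    have : (PySem.Dict.ofList PDict).values = [] := by
      simp [PySem.Dict.values, hit]
    simp [this, PySem.List.max?]
  | cons p t =>
    obtain ⟨k0, v0⟩ := p
    have hvals : (PySem.Dict.ofList PDict).values = v0 :: t.map Prod.snd := by
      simp [PySem.Dict.values, hit]
    have hkeys : (PySem.Dict.ofList PDict).keys = k0 :: t.map Prod.fst := by
      simp [PySem.Dict.keys, hit]
    have hmax : PySem.List.max? (PySem.Dict.ofList PDict).values (fun y => y)
        = some ((t.map Prod.snd).foldl max v0) := by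
      rw [hvals, PySem.List.max?_id_cons]
    rw [hmax]
    -- A's loop over keys with a dict lookup = the collecting loop over the items
    have hlookup : ∀ kv ∈ (k0, v0) :: t, (PySem.Dict.ofList PDict).getD kv.1 0 = kv.2 := by
      intro kv hkv
      exact PySem.Dict.getD_of_mem_items _ (by rw [hit]; exact hkv) hnd 0
    have hA : ∀ (M : Int), (PySem.Dict.ofList PDict).keys.foldl
        (fun acc id => if (PySem.Dict.ofList PDict).getD id 0 = M then acc ++ [id] else acc) []
        = ((k0, v0) :: t).foldl (fun acc kv => if kv.2 = M then acc ++ [kv.1] else acc) [] := by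
      intro M
      rw [hkeys, show (k0 :: t.map Prod.fst : List Int) = (((k0, v0) :: t).map Prod.fst) from rfl,
        List.foldl_map]
      apply PySem.List.foldl_congr_mem
      intro acc kv hkv
      rw [hlookup kv hkv]
    dsimp only
    rw [hA, foldB_spec]
    by_cases hM0 : (t.map Prod.snd).foldl max v0 ≠ 0
    · simp only [if_pos hM0, collect_eq_filter, List.foldl_cons, List.nil_append]
    · simp [hM0]

-- ===== VERDICT (by name: the statement is the Claim_ definition above) =====
theorem PriorityForId_py_spec : Claim_equal_PriorityForId_py := by
  intro PDict _ _
  unfold Spec_PriorityForId_py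
  exact PriorityForId_eq_alt PDict
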